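-- pv_equiv track=rewrite | github.com/jvasso/experiments_utils | src/experiments_utils/experiments.py | format_dict_list_string
-- ===== SOURCE A (Python) =====
-- from collections import defaultdict
--
-- def format_dict_list_string(dict_list):
--     grouped = defaultdict(list)
--
--     # Create formatted lines and group them by their string length
--     for d in dict_list:
--         line = f"    {{{', '.join(f'{repr(k)}: {repr(v)}' for k, v in d.items())}}},"
--         grouped[len(line)].append(line)
--
--     # Sort groups by line length and compile output
--     lines = ["["]
--     for length in sorted(grouped):
--         lines.extend(grouped[length])
--     lines.append("]")
--
--     return "\n".join(lines)
-- ===== SOURCE B (Python) =====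
-- def format_dict_list_string(dict_list):
--     out = []
--     for d in dict_list:
--         parts = []
--         for k, v in d.items():
--             parts.append(repr(k) + ": " + repr(v))
--         line = "    {" + ", ".join(parts) + "},"
--         i = 0
--         while i < len(out) and len(out[i]) <= len(line):
--             i += 1
--         out.insert(i, line)
--     return "\n".join(["["] + out + ["]"])
-- ===== Notes on version B (the rewrite author's own statement) =====
-- stated objective: alternative
-- what changed: B drops the defaultdict grouping and the final sort over group keys: it maintains one output list sorted by line length online, inserting each freshly formatted line after all lines of smaller or equal length (which reproduces A's stable per-group order).
import Mathlib
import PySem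

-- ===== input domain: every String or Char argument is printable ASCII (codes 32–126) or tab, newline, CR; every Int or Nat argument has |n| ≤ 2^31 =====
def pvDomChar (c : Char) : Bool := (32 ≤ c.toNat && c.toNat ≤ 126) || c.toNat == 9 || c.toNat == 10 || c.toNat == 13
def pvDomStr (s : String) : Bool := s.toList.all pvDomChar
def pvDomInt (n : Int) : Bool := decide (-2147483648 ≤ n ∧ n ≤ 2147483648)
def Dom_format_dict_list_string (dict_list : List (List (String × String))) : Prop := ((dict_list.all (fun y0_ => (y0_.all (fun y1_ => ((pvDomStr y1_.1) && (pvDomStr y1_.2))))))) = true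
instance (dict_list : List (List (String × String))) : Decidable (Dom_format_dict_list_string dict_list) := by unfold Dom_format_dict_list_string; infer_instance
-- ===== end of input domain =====

-- B drops the group-by-length dict and the final sort over group keys: it keeps ONE output
-- list sorted by line length online, inserting each formatted line after all lines of
-- smaller-or-equal length (objective: alternative; reproduces A's stable per-group order).

-- ===== PORT A =====
-- Python's repr(s) for str arguments, exact on the ASCII domain above:
-- quote choice, and escaping of backslash, the quote character, tab, newline, CR.
def pyReprEsc (q : Char) (cs : List Char) : List Char :=
  cs.flatMap (fun c =>
    if c = '\\' then ['\\', '\\']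
    else if c = q then ['\\', q]
    else if c = '\t' then ['\\', 't']
    else if c = '\n' then ['\\', 'n']
    else if c = '\r' then ['\\', 'r']
    else [c])

def pyRepr (s : String) : String :=
  let cs := s.toList
  let q : Char := if cs.contains '\'' && !cs.contains '"' then '"' else '\''
  String.ofList (q :: (pyReprEsc q cs ++ [q]))

def fmtLine (d : List (String × String)) : String :=
  "    {" ++ PySem.Str.join ", " (d.map (fun kv => pyRepr kv.1 ++ ": " ++ pyRepr kv.2)) ++ "},"

def format_dict_list_string (dict_list : List (List (String × String))) : String :=
  let grouped := dict_list.foldl (fun (g : PySem.Dict Int (List String)) d =>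
      let line := fmtLine d
      g.modify (PySem.Str.len line) [] (fun cur => cur ++ [line])) PySem.Dict.empty
  let lines := (PySem.List.sorted grouped.keys (fun k => k) false).foldl
      (fun acc length => acc ++ grouped.getD length []) ["["]
  let lines := lines ++ ["]"]
  PySem.Str.join "\n" lines


-- ===== PORT B =====
-- B builds each line from an explicit `parts` accumulator, then places it into the
-- already length-sorted output list `out` after all lines of smaller-or-equal length
-- (the Python `while i < len(out) and len(out[i]) <= len(line)` scan + insert).
def altInsert (line : String) : List String → List String
  | [] => [line]
  | y :: ys =>
      if PySem.Str.len y ≤ PySem.Str.len line then y :: altInsert line ys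
      else line :: y :: ys

def altLine (d : List (String × String)) : String :=
  let parts : List String :=
    d.foldl (fun parts kv => parts ++ [pyRepr kv.1 ++ ": " ++ pyRepr kv.2]) []
  "    {" ++ PySem.Str.join ", " parts ++ "},"

def format_dict_list_string_alt (dict_list : List (List (String × String))) : String :=
  let out := dict_list.foldl (fun out d => altInsert (altLine d) out) []
  PySem.Str.join "\n" ("[" :: (out ++ ["]"]))


-- ===== PRECONDITION & SPEC =====
def Spec_format_dict_list_string (dict_list : List (List (String × String))) (out : String) : Prop := out = format_dict_list_string_alt dict_list
instance (dict_list : List (List (String × String))) (out : String) : Decidable (Spec_format_dict_list_string dict_list out) := by unfold Spec_format_dict_list_string; infer_instance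

-- ===== CLAIM (what is proved, stated in full; the proofs are below) =====
def Claim_equal_format_dict_list_string : Prop := ∀ (dict_list : List (List (String × String))), Dom_format_dict_list_string dict_list → Spec_format_dict_list_string dict_list (format_dict_list_string dict_list)

-- ===== LEMMAS AND PROOFS =====

lemma insertBy_all {α : Type} (before : α → α → Bool) (x : α) (l : List α)
    (h : ∀ y ∈ l, before x y = true) : PySem.List.insertBy before x l = x :: l := by
  cases l with
  | nil => simp [PySem.List.insertBy]
  | cons y ys => simp [PySem.List.insertBy, h y (by simp)]

lemma insertBy_append_not {α : Type} (before : α → α → Bool) (x : α) (l₁ l₂ : List α)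
    (h : ∀ y ∈ l₁, before x y = false) :
    PySem.List.insertBy before x (l₁ ++ l₂) = l₁ ++ PySem.List.insertBy before x l₂ := by
  induction l₁ with
  | nil => simp
  | cons y ys ih =>
    simp only [List.cons_append, PySem.List.insertBy, h y (by simp)]
    simp only [Bool.false_eq_true, if_false]
    rw [ih (fun z hz => h z (by simp [hz]))]

lemma flatMap_congr_mem {α β : Type} (l : List α) (f g : α → List β)
    (h : ∀ a ∈ l, f a = g a) : l.flatMap f = l.flatMap g := by
  induction l with
  | nil => rfl
  | cons a t ih =>
    simp only [List.flatMap_cons, h a (by simp), ih (fun b hb => h b (by simp [hb]))]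


lemma insert_into_groups {α : Type} (key : α → Int) (x : α) (ks : List Int)
    (hks : ks.Pairwise (· < ·)) (G : Int → List α)
    (hG : ∀ k ∈ ks, ∀ y ∈ G k, key y = k) :
    PySem.List.insertBy (fun a b => decide (key a < key b)) x (ks.flatMap G) =
      if key x ∈ ks
      then ks.flatMap (fun k => G k ++ if k = key x then [x] else [])
      else (PySem.List.insertBy (fun a b => decide (a < b)) (key x) ks).flatMap
             (fun k => if k = key x then [x] else G k) := by
  induction ks with
  | nil =>
    simp [PySem.List.insertBy]
  | cons k ks ih =>
    obtain ⟨hk, hks'⟩ := List.pairwise_cons.mp hks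
    have hGk : ∀ y ∈ G k, key y = k := hG k (by simp)
    have hGks : ∀ j ∈ ks, ∀ y ∈ G j, key y = j := fun j hj => hG j (by simp [hj])
    rcases lt_trichotomy (key x) k with hlt | heq | hgt
    · -- key x smaller than every key present
      have hnm : key x ∉ k :: ks := by
        intro hm
        rcases List.mem_cons.mp hm with h1 | h2
        · omega
        · exact absurd (hk _ h2) (by omega)
      rw [if_neg hnm]
      have hall : ∀ y ∈ (k :: ks).flatMap G, (fun a b => decide (key a < key b)) x y = true := by
        intro y hy
        rcases List.mem_flatMap.mp hy with ⟨j, hj, hyj⟩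
        have hkey : key y = j := hG j hj y hyj
        rcases List.mem_cons.mp hj with h1 | h2
        · simp [hkey, h1, hlt]
        · have := hk _ h2; simp [hkey]; omega
      rw [insertBy_all _ _ _ hall]
      rw [show PySem.List.insertBy (fun a b => decide (a < b)) (key x) (k :: ks) =
          key x :: k :: ks by simp [PySem.List.insertBy, hlt]]
      simp only [List.flatMap_cons]
      rw [if_pos trivial, if_neg (show ¬ k = key x by omega),
        flatMap_congr_mem ks (fun j => if j = key x then [x] else G j) G (by
          intro j hj
          have : j ≠ key x := by have := hk _ hj; omega
          simp [this])]
      simp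
    · -- key x equals the head key
      rw [if_pos (by simp [heq])]
      rw [List.flatMap_cons, List.flatMap_cons]
      rw [insertBy_append_not _ _ _ _ (by
        intro y hy; have := hGk y hy; simp [this, heq])]
      rw [insertBy_all _ _ _ (by
        intro y hy
        rcases List.mem_flatMap.mp hy with ⟨j, hj, hyj⟩
        have h1 := hGks j hj y hyj
        have h2 := hk _ hj
        simp only [h1, decide_eq_true_eq]; omega)]
      rw [flatMap_congr_mem ks (fun j => G j ++ if j = key x then [x] else []) G (by
        intro j hj
        have hne : j ≠ key x := by have := hk _ hj; omega
        simp [hne])]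
      rw [if_pos heq.symm]
      simp
    · -- key x greater than the head key
      have hne : key x ≠ k := by omega
      rw [List.flatMap_cons]
      rw [insertBy_append_not _ _ _ _ (by
        intro y hy; have h1 := hGk y hy
        simp only [h1, decide_eq_false_iff_not, not_lt]; omega)]
      rw [ih hks' hGks]
      by_cases hm : key x ∈ ks
      · rw [if_pos hm, if_pos (by simp [hm]), List.flatMap_cons]
        rw [if_neg (Ne.symm hne)]
        simp
      · rw [if_neg hm, if_neg (by simp [hm, hne])]
        rw [show PySem.List.insertBy (fun a b => decide (a < b)) (key x) (k :: ks) =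
            k :: PySem.List.insertBy (fun a b => decide (a < b)) (key x) ks by
          simp [PySem.List.insertBy]; omega]
        rw [List.flatMap_cons, if_neg (Ne.symm hne)]

lemma stable_sort_groups {α : Type} (key : α → Int) (xs : List α) :
    PySem.List.sorted xs key false =
      (PySem.List.sorted (PySem.Set.ofList (xs.map key)) (fun k => k) false).flatMap
        (fun k => xs.filter (fun y => key y == k)) := by
  induction xs using List.reverseRecOn with
  | nil => rfl
  | append_singleton xs x ih =>
    have hsplit : PySem.List.sorted (xs ++ [x]) key false =
        PySem.List.insertBy (fun a b => decide (key a < key b)) x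
          (PySem.List.sorted xs key false) := by
      rw [PySem.List.sorted_eq_foldl_insertBy, PySem.List.sorted_eq_foldl_insertBy,
        List.foldl_append]
      rfl
    rw [hsplit, ih]
    set ks := PySem.List.sorted (PySem.Set.ofList (xs.map key)) (fun k => k) false with hksdef
    have hks : ks.Pairwise (· < ·) := PySem.List.sorted_ofList_pairwise_lt _
    have hmemks : ∀ k : Int, k ∈ ks ↔ k ∈ xs.map key := by
      intro k
      rw [hksdef, PySem.List.mem_sorted, PySem.Set.mem_ofList]
    have hG : ∀ k ∈ ks, ∀ y ∈ xs.filter (fun y => key y == k), key y = k := by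
      intro k _ y hy
      have := (List.mem_filter.mp hy).2
      simpa using this
    rw [insert_into_groups key x ks hks _ hG]
    have hofl : PySem.Set.ofList ((xs ++ [x]).map key) =
        PySem.Set.add (PySem.Set.ofList (xs.map key)) (key x) := by
      rw [List.map_append, PySem.Set.ofList, List.foldl_append, ← PySem.Set.ofList]
      rfl
    by_cases hm : key x ∈ xs.map key
    · rw [if_pos ((hmemks _).mpr hm)]
      have hadd : PySem.Set.add (PySem.Set.ofList (xs.map key)) (key x) =
          PySem.Set.ofList (xs.map key) := by
        rw [PySem.Set.add]
        simp [PySem.Set.mem_ofList, hm]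
      rw [hofl, hadd, ← hksdef]
      apply flatMap_congr_mem
      intro k _
      rw [List.filter_append]
      simp only [List.filter_cons, List.filter_nil]
      by_cases hkx : k = key x
      · simp [hkx]
      · simp [beq_iff_eq, hkx, Ne.symm hkx]
    · rw [if_neg (fun h => hm ((hmemks _).mp h))]
      have hGnil : xs.filter (fun y => key y == key x) = [] := by
        rw [List.filter_eq_nil_iff]
        intro y hy
        simp only [beq_iff_eq]
        intro hEq
        exact hm (hEq ▸ List.mem_map_of_mem hy)
      have hadd : PySem.Set.add (PySem.Set.ofList (xs.map key)) (key x) =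
          PySem.Set.ofList (xs.map key) ++ [key x] := by
        rw [PySem.Set.add]
        simp [PySem.Set.mem_ofList, hm]
      have hsorted' : PySem.List.sorted (PySem.Set.ofList (xs.map key) ++ [key x])
          (fun k => k) false =
          PySem.List.insertBy (fun a b => decide (a < b)) (key x) ks := by
        rw [PySem.List.sorted_eq_foldl_insertBy, List.foldl_append, hksdef,
          PySem.List.sorted_eq_foldl_insertBy]
        rfl
      rw [hofl, hadd, hsorted']
      apply flatMap_congr_mem
      intro k hk
      rw [List.filter_append]
      simp only [List.filter_cons, List.filter_nil]
      rcases (PySem.List.mem_insertBy _ _ _ _).mp hk with h1 | h2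
      · rw [if_pos h1, h1, hGnil]
        simp
      · have hne : k ≠ key x := by
          intro hEq
          exact hm ((hmemks _).mp (hEq ▸ h2))
        rw [if_neg hne]
        simp [beq_iff_eq, Ne.symm hne]

lemma grouped_eq (dl : List (List (String × String))) :
    dl.foldl (fun (g : PySem.Dict Int (List String)) d =>
        g.modify (PySem.Str.len (fmtLine d)) [] (fun cur => cur ++ [fmtLine d])) PySem.Dict.empty
    = ((dl.map fmtLine).map (fun l => (PySem.Str.len l, l))).foldl
        (fun (g : PySem.Dict Int (List String)) p => g.modify p.1 [] (fun cur => cur ++ [p.2]))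
        PySem.Dict.empty := by
  rw [List.map_map, List.foldl_map]
  rfl

lemma grouped_getD (dl : List (List (String × String))) (k : Int) :
    (dl.foldl (fun (g : PySem.Dict Int (List String)) d =>
        g.modify (PySem.Str.len (fmtLine d)) [] (fun cur => cur ++ [fmtLine d])) PySem.Dict.empty).getD k []
    = (dl.map fmtLine).filter (fun l => PySem.Str.len l == k) := by
  rw [grouped_eq, PySem.Dict.getD_foldl_modify_append, PySem.Dict.getD_empty]
  rw [List.filter_map, List.map_map]
  simp [Function.comp_def]

lemma grouped_keys (dl : List (List (String × String))) :
    (dl.foldl (fun (g : PySem.Dict Int (List String)) d =>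
        g.modify (PySem.Str.len (fmtLine d)) [] (fun cur => cur ++ [fmtLine d])) PySem.Dict.empty).keys
    = PySem.Set.ofList ((dl.map fmtLine).map PySem.Str.len) := by
  rw [grouped_eq, PySem.Dict.keys_foldl_modify_key, PySem.Dict.keys_empty, List.map_map]
  rw [PySem.Set.update_eq_append_filter]
  simp [Function.comp_def]

-- A's value, characterised as the stable sort of the formatted lines by length.
theorem portA_eq_sorted (dl : List (List (String × String))) :
    format_dict_list_string dl =
      PySem.Str.join "\n" (["["] ++ PySem.List.sorted (dl.map fmtLine) PySem.Str.len false ++ ["]"]) := by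
  simp only [format_dict_list_string]
  rw [PySem.List.foldl_append_eq_flatMap, grouped_keys]
  rw [flatMap_congr_mem _ _ (fun k => (dl.map fmtLine).filter (fun l => PySem.Str.len l == k))
    (fun k _ => grouped_getD dl k)]
  rw [← stable_sort_groups PySem.Str.len (dl.map fmtLine)]

-- B-side: the parts accumulator builds exactly A's mapped list.
lemma parts_foldl_eq {α β : Type} (f : α → β) (l : List α) (acc : List β) :
    l.foldl (fun acc a => acc ++ [f a]) acc = acc ++ l.map f := by
  induction l generalizing acc with
  | nil => simp
  | cons a t ih => simp [ih]

lemma altLine_eq_fmtLine (d : List (String × String)) : altLine d = fmtLine d := by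
  simp only [altLine, fmtLine, parts_foldl_eq, List.nil_append]

-- B's insertion is exactly the stable `insertBy` step of PySem's sort.
lemma altInsert_eq_insertBy (x : String) (l : List String) :
    altInsert x l =
      PySem.List.insertBy (fun a b => decide (PySem.Str.len a < PySem.Str.len b)) x l := by
  induction l with
  | nil => rfl
  | cons y ys ih =>
    simp only [altInsert, PySem.List.insertBy, ih]
    by_cases h : PySem.Str.len y ≤ PySem.Str.len x
    · rw [if_pos h, if_neg (by simp only [decide_eq_true_eq]; omega)]
    · rw [if_neg h, if_pos (by simp only [decide_eq_true_eq]; omega)]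

-- B's value equals the same stable sort.
theorem portB_eq_sorted (dl : List (List (String × String))) :
    format_dict_list_string_alt dl =
      PySem.Str.join "\n" (["["] ++ PySem.List.sorted (dl.map fmtLine) PySem.Str.len false ++ ["]"]) := by
  simp only [format_dict_list_string_alt]
  have : dl.foldl (fun out d => altInsert (altLine d) out) [] =
      PySem.List.sorted (dl.map fmtLine) PySem.Str.len false := by
    rw [PySem.List.sorted_eq_foldl_insertBy, List.foldl_map]
    apply PySem.List.foldl_congr_mem
    intro out d _
    rw [altLine_eq_fmtLine, altInsert_eq_insertBy]
  rw [this]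
  simp

-- ===== VERDICT (by name: the statement is the Claim_ definition above) =====
theorem format_dict_list_string_spec : Claim_equal_format_dict_list_string := by
  intro dl _
  unfold Spec_format_dict_list_string
  rw [portA_eq_sorted, portB_eq_sorted]
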